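-- pv_equiv track=rewrite | github.com/SuminBae97/Problem_Solving | PROGRAMMERS/짝지어제거하기.py | solution
-- ===== SOURCE A (Python) =====
-- def solution(s):
-- 	s = list(s)
-- 	f = s.pop(0)
-- 	stack = [f]
--
-- 	while s:
-- 		val = s.pop(0)
--
-- 		if len(stack)==0:
-- 			stack.append(val)
--
-- 		elif val==stack[-1]:
-- 			stack.pop(-1)
--
-- 		else:
-- 			stack.append(val)
--
-- 	if len(stack)==0:
-- 		return 1
--
-- 	else:
-- 		return 0
-- ===== SOURCE B (Python) =====
-- def solution(s):
--     stack = []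
--     for c in s:
--         if stack and stack[-1] == c:
--             stack.pop()
--         else:
--             stack.append(c)
--     return 1 if not stack else 0
-- ===== Notes on version B (the rewrite author's own statement) =====
-- stated objective: faster
-- what changed: Replaces A's O(n^2) while-loop that destructively pops the front of a list copy (plus a special-cased first character) with a single for-loop fold over the string maintaining a stack, pushing/popping only at the end.
import Mathlib
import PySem

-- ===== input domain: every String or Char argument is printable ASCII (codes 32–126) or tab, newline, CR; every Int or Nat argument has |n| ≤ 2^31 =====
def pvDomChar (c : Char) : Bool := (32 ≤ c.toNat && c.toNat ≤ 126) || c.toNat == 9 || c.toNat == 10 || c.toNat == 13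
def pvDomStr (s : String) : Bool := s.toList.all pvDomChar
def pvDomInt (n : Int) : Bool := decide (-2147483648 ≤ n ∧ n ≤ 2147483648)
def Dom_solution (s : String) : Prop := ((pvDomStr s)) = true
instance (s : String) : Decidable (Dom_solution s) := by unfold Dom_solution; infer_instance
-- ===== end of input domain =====

-- B replaces A's quadratic while-loop (pop(0) on a list copy, first char special-cased)
-- with a single linear for-loop fold over the string maintaining a stack.

-- ===== PORT A =====
-- A's while loop: 'rest' is the remaining popped-from list, 'stack' the stack.
def solutionLoop : List Char → List Char → List Char
  | [], stack => stack
  | val :: rest, stack =>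
    if stack.length = 0 then solutionLoop rest (stack ++ [val])
    else if PySem.List.pyGet? stack (-1) = some val then solutionLoop rest stack.dropLast
    else solutionLoop rest (stack ++ [val])

def solution (s : String) : Int :=
  match s.toList with
  | [] => 0   -- unreachable under Pre_solution: Python A raises IndexError here (s.pop(0) on [])
  | f :: rest =>
    let stack := solutionLoop rest [f]
    if stack.length = 0 then 1 else 0

-- ===== PORT B =====
def solution_alt (s : String) : Int :=
  let stack := s.toList.foldl
    (fun st c => if st ≠ [] ∧ PySem.List.pyGet? st (-1) = some c then st.dropLast else st ++ [c]) []
  if stack = [] then 1 else 0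

-- ===== PRECONDITION & SPEC =====
-- Pre_ excludes only the empty string, on which A raises IndexError (pop from empty list).
def Pre_solution (s : String) : Prop := s ≠ ""
instance (s : String) : Decidable (Pre_solution s) := by unfold Pre_solution; infer_instance
def pvWitness_solution : String := "baab"

def Spec_solution (s : String) (out : Int) : Prop := out = solution_alt s
instance (s : String) (out : Int) : Decidable (Spec_solution s out) := by unfold Spec_solution; infer_instance

-- ===== CLAIM (what is proved, stated in full; the proofs are below) =====
def Claim_equal_solution : Prop := ∀ (s : String), Dom_solution s → Pre_solution s → Spec_solution s (solution s)

-- ===== LEMMAS AND PROOFS =====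
-- The two step functions coincide, so A's loop is B's fold.
lemma step_eq (st : List Char) (val : Char) :
    (if st.length = 0 then st ++ [val]
     else if PySem.List.pyGet? st (-1) = some val then st.dropLast
     else st ++ [val])
    = (if st ≠ [] ∧ PySem.List.pyGet? st (-1) = some val then st.dropLast else st ++ [val]) := by
  cases st with
  | nil => simp
  | cons a t => simp [PySem.List.pyGet?_neg_one]

lemma loop_eq_foldl (l : List Char) (st : List Char) :
    solutionLoop l st
      = l.foldl (fun st c => if st ≠ [] ∧ PySem.List.pyGet? st (-1) = some c then st.dropLast else st ++ [c]) st := by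
  induction l generalizing st with
  | nil => rfl
  | cons v rest ih =>
    rw [List.foldl_cons, ← step_eq, solutionLoop]
    split_ifs with h1 h2 <;> simp_all [ih]

-- ===== VERDICT (by name: the statement is the Claim_ definition above) =====
theorem solution_spec : Claim_equal_solution := by
  intro s _ hpre
  unfold Spec_solution solution solution_alt
  have hs : s.toList ≠ [] := by
    intro h; exact hpre (String.toList_inj.mp (by simp [h]))
  cases hl : s.toList with
  | nil => exact absurd hl hs
  | cons f rest =>
    simp only [hl, loop_eq_foldl, List.foldl_cons]
    simp [List.length_eq_zero_iff]
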